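-- pv_equiv track=rewrite | github.com/a-westermann/AI_Assistant | misc_tools/shopping_list_store.py | _has_four_char_overlap
-- ===== SOURCE A (Python) =====
-- def normalize_name(name: str) -> str:
--     return " ".join((name or "").strip().lower().split())
--
-- def _compact_for_overlap(s: str) -> str:
--     return "".join(ch for ch in normalize_name(s) if ch.isalnum())
--
-- def _has_four_char_overlap(a: str, b: str) -> bool:
--     aa = _compact_for_overlap(a)
--     bb = _compact_for_overlap(b)
--     if len(aa) < 4 or len(bb) < 4:
--         return False
--     short, long_ = (aa, bb) if len(aa) <= len(bb) else (bb, aa)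
--     shingles = {short[i : i + 4] for i in range(0, len(short) - 3)}
--     return any(chunk in long_ for chunk in shingles)
-- ===== SOURCE B (Python) =====
-- def normalize_name(name: str) -> str:
--     return " ".join((name or "").strip().lower().split())
--
-- def _compact_for_overlap(s: str) -> str:
--     return "".join(ch for ch in normalize_name(s) if ch.isalnum())
--
-- def _has_four_char_overlap(a: str, b: str) -> bool:
--     # Longest-common-substring dynamic programming instead of 4-gram shingles:
--     # prev[j+1] holds the length of the longest common suffix of the processed
--     # prefix of aa and bb[:j+1]; a cell reaching 4 means a shared 4-char run.
--     aa = _compact_for_overlap(a)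
--     bb = _compact_for_overlap(b)
--     prev = [0] * (len(bb) + 1)
--     for ca in aa:
--         cur = [0]
--         for p, cb in zip(prev, bb):
--             v = p + 1 if ca == cb else 0
--             if v >= 4:
--                 return True
--             cur.append(v)
--         prev = cur
--     return False
-- ===== Notes on version B (the rewrite author's own statement) =====
-- stated objective: alternative
-- what changed: Replaces the 4-gram shingle set plus substring-containment scan with a longest-common-substring dynamic programming pass (rolling previous-row array) that flags when a common run reaches length 4.
import Mathlib
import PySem

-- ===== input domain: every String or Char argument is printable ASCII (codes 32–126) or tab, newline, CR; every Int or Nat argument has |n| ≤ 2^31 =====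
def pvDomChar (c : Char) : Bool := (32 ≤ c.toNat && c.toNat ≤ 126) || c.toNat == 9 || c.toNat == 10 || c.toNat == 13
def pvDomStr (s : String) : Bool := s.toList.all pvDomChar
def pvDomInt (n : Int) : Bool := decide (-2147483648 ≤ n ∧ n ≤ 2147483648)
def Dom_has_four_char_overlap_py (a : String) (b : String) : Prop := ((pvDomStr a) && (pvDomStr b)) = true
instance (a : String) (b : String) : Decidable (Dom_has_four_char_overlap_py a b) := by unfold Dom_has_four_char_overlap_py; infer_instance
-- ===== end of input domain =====

-- B replaces A's 4-gram shingle set + substring-containment scan by a longest-common-substring DP row; same return value (objective: alternative).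

-- ===== PORT A =====
-- " ".join((name or "").strip().lower().split())  ('name or ""' is the identity on str values)
def normalize_name (name : String) : String :=
  PySem.Str.join " " (PySem.Str.split₀ (PySem.Str.lower (PySem.Str.strip name)))

-- "".join(ch for ch in normalize_name(s) if ch.isalnum()) — the Python str is represented by its list of chars
def compact_for_overlap (s : String) : List Char :=
  (normalize_name s).toList.filter PySem.Chars.isalnum

-- the body of A's _has_four_char_overlap after the two compactions
def overlap_shingles (aa bb : List Char) : Bool :=
  if aa.length < 4 || bb.length < 4 then false
  else
    let sl := if aa.length ≤ bb.length then (aa, bb) else (bb, aa)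
    let shingles : PySem.Set (List Char) :=
      PySem.Set.ofList ((PySem.List.pyRange 0 (PySem.List.len sl.1 - 3) 1).map
        (fun i => PySem.List.slice sl.1 (some i) (some (i + 4))))
    shingles.any (fun chunk => PySem.Chars.isIn chunk sl.2)

def has_four_char_overlap_py (a : String) (b : String) : Bool :=
  overlap_shingles (compact_for_overlap a) (compact_for_overlap b)

-- ===== PORT B =====
-- the inner 'for p, cb in zip(prev, bb)' loop of Source B: none = early 'return True' (a cell reached 4)
def dpInner (ca : Char) : List (Nat × Char) → List Nat → Option (List Nat)
  | [], cur => some cur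
  | pc :: rest, cur =>
      let v := if ca == pc.2 then pc.1 + 1 else 0
      if 4 ≤ v then none else dpInner ca rest (cur ++ [v])

-- the outer 'for ca in aa' loop of Source B over the rolling previous row
def dpOuter (bb : List Char) : List Char → List Nat → Bool
  | [], _ => false
  | ca :: rest, prev =>
      match dpInner ca (prev.zip bb) [0] with
      | none => true
      | some cur => dpOuter bb rest cur

-- the DP of Source B after the two compactions
def overlap_dp (aa bb : List Char) : Bool :=
  dpOuter bb aa (List.replicate (bb.length + 1) 0)

def has_four_char_overlap_py_alt (a : String) (b : String) : Bool :=
  overlap_dp (compact_for_overlap a) (compact_for_overlap b)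

-- ===== PRECONDITION & SPEC =====
def Spec_has_four_char_overlap_py (a : String) (b : String) (out : Bool) : Prop := out = has_four_char_overlap_py_alt a b
instance (a : String) (b : String) (out : Bool) : Decidable (Spec_has_four_char_overlap_py a b out) := by unfold Spec_has_four_char_overlap_py; infer_instance

-- ===== CLAIM (what is proved, stated in full; the proofs are below) =====
def Claim_equal_has_four_char_overlap_py : Prop := ∀ (a : String) (b : String), Dom_has_four_char_overlap_py a b → Spec_has_four_char_overlap_py a b (has_four_char_overlap_py a b)

-- ===== LEMMAS AND PROOFS =====

-- "aa and bb share a contiguous substring of length 4"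
def SharedFour (aa bb : List Char) : Prop :=
  ∃ l : List Char, l.length = 4 ∧ l <:+: aa ∧ l <:+: bb

-- ---- the A side ----

theorem infix_len4_iff (s chunk : List Char) :
    (chunk.length = 4 ∧ chunk <:+: s) ↔ ∃ i : Nat, i + 4 ≤ s.length ∧ chunk = (s.drop i).take 4 := by
  constructor
  · rintro ⟨hl, pre, suf, rfl⟩
    refine ⟨pre.length, by simp [hl], ?_⟩
    rw [List.append_assoc, List.drop_left, ← hl, List.take_left]
  · rintro ⟨i, hi, rfl⟩
    constructor
    · simp; omega
    · exact ((List.take_prefix 4 (s.drop i)).isInfix).trans (List.drop_suffix i s).isInfix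

theorem shingles_any_iff (s l : List Char) :
    ((PySem.Set.ofList ((PySem.List.pyRange 0 (PySem.List.len s - 3) 1).map
        (fun i => PySem.List.slice s (some i) (some (i + 4))))).any
      (fun chunk => PySem.Chars.isIn chunk l)) = true ↔ SharedFour s l := by
  rw [List.any_eq_true]
  constructor
  · rintro ⟨chunk, hmem, hin⟩
    rw [PySem.Set.mem_ofList, List.mem_map] at hmem
    obtain ⟨i, hi, rfl⟩ := hmem
    rw [PySem.List.mem_pyRange_one] at hi
    obtain ⟨hi0, hi1⟩ := hi
    rw [PySem.List.len_eq] at hi1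
    have hslice : PySem.List.slice s (some i) (some (i + 4)) = (s.drop i.toNat).take 4 := by
      rw [PySem.List.slice_toNat s hi0 (by omega)]
      congr 1
      omega
    rw [hslice] at hin
    rw [PySem.Chars.isIn_iff_infix] at hin
    obtain ⟨h1, h2⟩ := (infix_len4_iff s ((s.drop i.toNat).take 4)).mpr
      ⟨i.toNat, by omega, rfl⟩
    exact ⟨_, h1, h2, hin⟩
  · rintro ⟨l4, hlen, hs, hl2⟩
    obtain ⟨i, hle, rfl⟩ := (infix_len4_iff s l4).mp ⟨hlen, hs⟩
    refine ⟨(s.drop i).take 4, ?_, ?_⟩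
    · rw [PySem.Set.mem_ofList, List.mem_map]
      refine ⟨(i : Int), ?_, ?_⟩
      · rw [PySem.List.mem_pyRange_one, PySem.List.len_eq]
        omega
      · rw [PySem.List.slice_toNat s (by omega) (by omega)]
        congr 1
        omega
    · rw [PySem.Chars.isIn_iff_infix]
      exact hl2

theorem sharedFour_symm {aa bb : List Char} (h : SharedFour aa bb) : SharedFour bb aa := by
  obtain ⟨l, h1, h2, h3⟩ := h; exact ⟨l, h1, h3, h2⟩

theorem sharedFour_short {aa bb : List Char} (h : SharedFour aa bb) :
    4 ≤ aa.length ∧ 4 ≤ bb.length := by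
  obtain ⟨l, h1, h2, h3⟩ := h
  have := h2.length_le
  have := h3.length_le
  omega

theorem overlap_shingles_iff (aa bb : List Char) :
    overlap_shingles aa bb = true ↔ SharedFour aa bb := by
  unfold overlap_shingles
  split_ifs with h h2
  · simp only [false_iff]
    intro hs
    obtain ⟨h1, h2⟩ := sharedFour_short hs
    simp at h
    omega
  · simpa using shingles_any_iff aa bb
  · have h' := shingles_any_iff bb aa
    constructor
    · intro hx
      exact sharedFour_symm (h'.mp (by simpa using hx))
    · intro hs
      simpa using h'.mpr (sharedFour_symm hs)

-- ---- the B side ----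

-- longest common prefix length
def lcp : List Char → List Char → Nat
  | a :: u, b :: v => if a = b then lcp u v + 1 else 0
  | _, _ => 0

-- longest common suffix length
def csl (u v : List Char) : Nat := lcp u.reverse v.reverse

theorem lcp_nil_right (u : List Char) : lcp u [] = 0 := by cases u <;> rfl

theorem lcp_nil_left (v : List Char) : lcp [] v = 0 := by cases v <;> rfl

theorem lcp_ge_iff (k : Nat) (u v : List Char) :
    k ≤ lcp u v ↔ u.take k = v.take k ∧ k ≤ u.length ∧ k ≤ v.length := by
  induction u generalizing v k with
  | nil => cases k <;> simp [lcp]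
  | cons a u ih =>
    cases v with
    | nil => cases k <;> simp [lcp]
    | cons b v =>
      cases k with
      | zero => simp
      | succ k =>
        by_cases h : a = b
        · simp only [lcp, if_pos h, List.take_succ_cons, List.length_cons]
          rw [Nat.succ_le_succ_iff, ih k v]
          subst h
          constructor
          · rintro ⟨h1, h2, h3⟩; exact ⟨by rw [h1], by omega, by omega⟩
          · rintro ⟨h1, h2, h3⟩
            simp only [List.cons.injEq] at h1
            exact ⟨h1.2, by omega, by omega⟩
        · simp only [lcp, if_neg h, List.take_succ_cons]
          constructor
          · omega
          · rintro ⟨h1, -⟩; simp only [List.cons.injEq] at h1; exact absurd h1.1 h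

theorem csl_ge_four_iff (u v : List Char) :
    4 ≤ csl u v ↔ ∃ l : List Char, l.length = 4 ∧ l <:+ u ∧ l <:+ v := by
  rw [csl, lcp_ge_iff]
  constructor
  · rintro ⟨h1, h2, h3⟩
    have h2' : 4 ≤ u.length := by simpa using h2
    have h3' : 4 ≤ v.length := by simpa using h3
    refine ⟨(u.reverse.take 4).reverse, ?_, ?_, ?_⟩
    · simp; omega
    · rw [← List.reverse_prefix]
      simpa using List.take_prefix 4 u.reverse
    · rw [← List.reverse_prefix]
      simpa [h1] using List.take_prefix 4 v.reverse
  · rintro ⟨l, hl, hu, hv⟩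
    rw [← List.reverse_prefix] at hu hv
    have h2' : 4 ≤ u.length := by have := hu.length_le; simp at this; omega
    have h3' : 4 ≤ v.length := by have := hv.length_le; simp at this; omega
    refine ⟨?_, by simpa using h2', by simpa using h3'⟩
    have e1 : l.reverse = u.reverse.take 4 :=
      List.IsPrefix.eq_of_length (List.prefix_take_iff.mpr ⟨hu, by simp [hl]⟩)
        (by simp [hl]; omega)
    have e2 : l.reverse = v.reverse.take 4 :=
      List.IsPrefix.eq_of_length (List.prefix_take_iff.mpr ⟨hv, by simp [hl]⟩)
        (by simp [hl]; omega)
    rw [← e1, ← e2]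

theorem csl_nil_right (u : List Char) : csl u [] = 0 := by simp [csl, lcp_nil_right]

theorem csl_nil_left (v : List Char) : csl [] v = 0 := by simp [csl, lcp_nil_left]

theorem csl_concat (x y : List Char) (c d : Char) :
    csl (x ++ [c]) (y ++ [d]) = if c = d then csl x y + 1 else 0 := by
  simp [csl, lcp]

-- the DP row after processing prefix x of aa
def row (x bb : List Char) : List Nat :=
  (List.range (bb.length + 1)).map (fun j => csl x (bb.take j))

theorem row_nil (bb : List Char) : row [] bb = List.replicate (bb.length + 1) 0 := by
  apply List.ext_getElem <;> simp [row, csl_nil_left]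

-- the inner loop: early exit iff some produced value reaches 4, else it appends all of them
theorem dpInner_eq (ca : Char) (l : List (Nat × Char)) (c : List Nat) :
    dpInner ca l c =
      if (l.map (fun pc => if ca == pc.2 then pc.1 + 1 else 0)).any (fun v => decide (4 ≤ v))
      then none
      else some (c ++ l.map (fun pc => if ca == pc.2 then pc.1 + 1 else 0)) := by
  induction l generalizing c with
  | nil => simp [dpInner]
  | cons p l ih =>
    simp only [dpInner, List.map_cons, List.any_cons]
    by_cases h : 4 ≤ (if ca == p.2 then p.1 + 1 else 0)
    · rw [if_pos h, decide_eq_true h, Bool.true_or, if_pos rfl]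
    · rw [if_neg h, ih, decide_eq_false h, Bool.false_or]
      split
      · rfl
      · simp

theorem row_step (ca : Char) (x bb : List Char) :
    0 :: ((row x bb).zip bb).map (fun pc => if ca == pc.2 then pc.1 + 1 else 0)
      = row (x ++ [ca]) bb := by
  apply List.ext_getElem
  · simp [row]
  · intro j hj hj'
    cases j with
    | zero => simp [row, csl_nil_right]
    | succ j =>
      have hjb : j < bb.length := by
        simp [row] at hj'; omega
      simp only [List.getElem_cons_succ, List.getElem_map, List.getElem_zip]
      have hrow : (row x bb)[j]'(by simp [row]; omega) = csl x (bb.take j) := by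
        simp [row]
      simp only [hrow]
      have hr : (row (x ++ [ca]) bb)[j+1]'(by simp [row]; omega) = csl (x ++ [ca]) (bb.take (j+1)) := by
        simp [row]
      rw [hr]
      have ht : bb.take (j+1) = bb.take j ++ [bb[j]] := by
        rw [List.take_add_one]
        simp [List.getElem?_eq_getElem hjb]
      rw [ht, csl_concat]
      simp only [beq_iff_eq]

theorem csl_exists_iff (u bb : List Char) :
    (∃ j : Nat, j < bb.length ∧ 4 ≤ csl u (bb.take (j + 1))) ↔
      ∃ l : List Char, l.length = 4 ∧ l <:+ u ∧ l <:+: bb := by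
  constructor
  · rintro ⟨j, hj, hc⟩
    obtain ⟨l, hl, hu, hv⟩ := (csl_ge_four_iff u (bb.take (j + 1))).mp hc
    exact ⟨l, hl, hu, hv.isInfix.trans (List.take_prefix (j + 1) bb).isInfix⟩
  · rintro ⟨l, hl, hu, pre, suf, rfl⟩
    refine ⟨pre.length + 3, by simp [hl]; omega, ?_⟩
    rw [csl_ge_four_iff]
    refine ⟨l, hl, hu, ?_⟩
    have : (pre ++ l ++ suf).take (pre.length + 3 + 1) = pre ++ l := by
      rw [List.append_assoc, show pre.length + 3 + 1 = pre.length + 4 from rfl,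
        List.take_length_add_append]
      rw [List.take_append_of_le_length (by omega), ← hl]
      simp
    rw [this]
    exact List.suffix_append pre l

theorem sharedFour_concat_iff (x bb : List Char) (ca : Char) :
    SharedFour (x ++ [ca]) bb ↔
      SharedFour x bb ∨ ∃ j : Nat, j < bb.length ∧ 4 ≤ csl (x ++ [ca]) (bb.take (j + 1)) := by
  rw [csl_exists_iff]
  constructor
  · rintro ⟨l, hl, hx, hb⟩
    rcases List.infix_concat_iff.mp hx with h | h
    · exact Or.inr ⟨l, hl, h, hb⟩
    · exact Or.inl ⟨l, hl, h, hb⟩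
  · rintro (⟨l, hl, hx, hb⟩ | ⟨l, hl, hx, hb⟩)
    · exact ⟨l, hl, hx.trans (List.prefix_append x [ca]).isInfix, hb⟩
    · exact ⟨l, hl, hx.isInfix, hb⟩

theorem sharedFour_nil (bb : List Char) : ¬ SharedFour [] bb := by
  rintro ⟨l, hl, hinf, -⟩
  rw [List.infix_nil] at hinf
  subst hinf
  simp at hl

-- the tail of a row lists the csl values at the prefixes bb.take (j+1)
theorem row_tail (u bb : List Char) :
    (row u bb).tail = (List.range bb.length).map (fun j => csl u (bb.take (j + 1))) := by
  simp [row, List.range_succ_eq_map, Function.comp_def]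

-- any four-char infix survives extending the first string
theorem sharedFour_mono {x bb : List Char} (w : List Char) (h : SharedFour x bb) :
    SharedFour (x ++ w) bb := by
  obtain ⟨l, h1, h2, h3⟩ := h
  exact ⟨l, h1, h2.trans (List.prefix_append x w).isInfix, h3⟩

-- the outer loop: starting from the row of a not-yet-matching prefix x, it reports
-- whether extending x by ys produces a shared four-char substring
theorem dpOuter_iff (bb : List Char) :
    ∀ (ys x : List Char), ¬ SharedFour x bb →
      (dpOuter bb ys (row x bb) = true ↔ SharedFour (x ++ ys) bb) := by
  intro ys
  induction ys with
  | nil =>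
    intro x hx
    simpa [dpOuter] using hx
  | cons ca ys ih =>
    intro x hx
    rw [dpOuter, dpInner_eq]
    by_cases h : (((row x bb).zip bb).map
        (fun pc => if ca == pc.2 then pc.1 + 1 else 0)).any (fun v => decide (4 ≤ v)) = true
    · rw [if_pos h]
      simp only [true_iff]
      have hex : ∃ j : Nat, j < bb.length ∧ 4 ≤ csl (x ++ [ca]) (bb.take (j + 1)) := by
        rw [List.any_eq_true] at h
        obtain ⟨v, hv, h4⟩ := h
        rw [show ((row x bb).zip bb).map (fun pc => if ca == pc.2 then pc.1 + 1 else 0)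
              = (row (x ++ [ca]) bb).tail from by rw [← row_step]; rfl, row_tail,
          List.mem_map] at hv
        obtain ⟨j, hj, rfl⟩ := hv
        exact ⟨j, List.mem_range.mp hj, of_decide_eq_true h4⟩
      have : SharedFour (x ++ [ca]) bb := (sharedFour_concat_iff x bb ca).mpr (Or.inr hex)
      simpa using sharedFour_mono ys this
    · rw [if_neg h]
      have hrow : ([(0 : Nat)] ++ ((row x bb).zip bb).map
            (fun pc => if ca == pc.2 then pc.1 + 1 else 0)) = row (x ++ [ca]) bb :=
        row_step ca x bb
      rw [hrow]
      have hnot : ¬ SharedFour (x ++ [ca]) bb := by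
        rw [sharedFour_concat_iff]
        rintro (hs | ⟨j, hj, h4⟩)
        · exact hx hs
        · apply h
          rw [List.any_eq_true]
          refine ⟨csl (x ++ [ca]) (bb.take (j + 1)), ?_, decide_eq_true h4⟩
          rw [show ((row x bb).zip bb).map (fun pc => if ca == pc.2 then pc.1 + 1 else 0)
                = (row (x ++ [ca]) bb).tail from by rw [← row_step]; rfl, row_tail,
            List.mem_map]
          exact ⟨j, List.mem_range.mpr hj, rfl⟩
      rw [ih (x ++ [ca]) hnot]
      rw [List.append_assoc, List.singleton_append]

theorem overlap_dp_iff (aa bb : List Char) :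
    overlap_dp aa bb = true ↔ SharedFour aa bb := by
  unfold overlap_dp
  rw [← row_nil bb]
  simpa using dpOuter_iff bb aa [] (sharedFour_nil bb)

theorem overlap_eq (aa bb : List Char) : overlap_shingles aa bb = overlap_dp aa bb := by
  have hA := overlap_shingles_iff aa bb
  have hB := overlap_dp_iff aa bb
  cases h1 : overlap_shingles aa bb <;> cases h2 : overlap_dp aa bb <;> simp_all

-- ===== VERDICT (by name: the statement is the Claim_ definition above) =====
theorem has_four_char_overlap_py_spec : Claim_equal_has_four_char_overlap_py := by
  intro a b _
  unfold Spec_has_four_char_overlap_py has_four_char_overlap_py has_four_char_overlap_py_alt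
  exact overlap_eq _ _
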